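-- pv_equiv track=rewrite | github.com/Gonsix/authorship-analysis | modules/count_pos_patterns.py | count_pos_patterns
-- ===== SOURCE A (Python) =====
-- def count_pos_patterns(documents, window_size=3):
--     width = window_size
--     pos_patterns = []
--     pos_freq_vectors = [[] for _ in range(len(documents))]
--     for docId, document in enumerate(documents):
--         len_doc = len(document)
--         for i in range(len_doc - (width-1)):
--             key_str = ""
--             key_str += document[i][0] # word
--
--             for j in range(1, width):
--                 key_str += " " + document[i+j][1] # POS
--
--             if key_str not in pos_patterns:
--                 pos_patterns.append(key_str)
--                 # パターンが現れたドキュメント -> 1 , それ以外　-> 0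
--                 for i in range(len(pos_freq_vectors)): # loop for K1, K2, Q
--                     if i == docId:
--                         pos_freq_vectors[i].append(1)
--                     else:
--                         pos_freq_vectors[i].append(0)
--
--             else:
--                 idx = pos_patterns.index(key_str)
--                 pos_freq_vectors[docId][idx] += 1
--
--     return (pos_patterns, pos_freq_vectors)
-- ===== SOURCE B (Python) =====
-- def count_pos_patterns(documents, window_size=3):
--     width = window_size
--     seen = {}          # ordered set of patterns (first-seen order)
--     doc_counts = []    # one pattern->count dict per document
--     for document in documents:
--         counts = {}
--         for i in range(len(document) - width + 1):
--             key = document[i][0]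
--             for j in range(1, width):
--                 key += " " + document[i + j][1]
--             seen[key] = None
--             counts[key] = counts.get(key, 0) + 1
--         doc_counts.append(counts)
--     pos_patterns = list(seen)
--     pos_freq_vectors = [[counts.get(p, 0) for p in pos_patterns] for counts in doc_counts]
--     return (pos_patterns, pos_freq_vectors)
-- ===== Notes on version B (the rewrite author's own statement) =====
-- stated objective: alternative
-- what changed: B replaces A's per-window linear membership test and .index scan over the growing pattern list, and its append-1/0-to-every-vector bookkeeping, by one ordered seen-dict plus a per-document count dict built in a single pass, assembling all frequency vectors in one final pass over the pattern list.
import Mathlib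
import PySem

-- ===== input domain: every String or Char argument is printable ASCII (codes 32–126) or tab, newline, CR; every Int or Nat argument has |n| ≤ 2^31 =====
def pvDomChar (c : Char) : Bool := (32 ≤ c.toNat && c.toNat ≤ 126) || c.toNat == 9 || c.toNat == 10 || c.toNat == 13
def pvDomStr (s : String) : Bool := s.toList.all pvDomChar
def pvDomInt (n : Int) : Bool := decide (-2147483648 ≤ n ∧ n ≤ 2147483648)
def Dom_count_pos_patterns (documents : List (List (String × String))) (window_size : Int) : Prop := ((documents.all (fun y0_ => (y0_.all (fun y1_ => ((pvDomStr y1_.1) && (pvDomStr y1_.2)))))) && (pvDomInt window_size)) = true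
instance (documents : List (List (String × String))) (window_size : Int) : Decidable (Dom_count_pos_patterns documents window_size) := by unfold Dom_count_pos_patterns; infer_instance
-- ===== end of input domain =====

-- B replaces A's per-pattern membership/index scans and 1/0-append bookkeeping by one ordered
-- seen-dict plus a per-document count dict, assembling the frequency vectors in a final pass (alternative decomposition).

-- ===== PORT A =====
def count_pos_patterns (documents : List (List (String × String))) (window_size : Int) : List String × List (List Int) :=
  let width := window_size
  let init : List String × List (List Int) := ([], (List.range documents.length).map (fun _ => []))
  (PySem.List.enumerate documents).foldl (fun st de =>
    let docId := de.1
    let document := de.2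
    let len_doc : Int := (document.length : Int)
    (PySem.List.pyRange 0 (len_doc - (width - 1))).foldl (fun st i =>
      let key_str : String := (PySem.List.pyRange 1 width).foldl
        (fun ks j => ks ++ " " ++ (PySem.List.pyGetD document (i + j) ("", "")).2)
        (PySem.List.pyGetD document i ("", "")).1
      if key_str ∉ st.1 then
        (st.1 ++ [key_str],
         (PySem.List.enumerate st.2).map
           (fun ir => if ir.1 == docId then ir.2 ++ [(1 : Int)] else ir.2 ++ [(0 : Int)]))
      else
        let idx : Int := ((PySem.List.index? st.1 key_str).getD 0 : Nat)
        let row := PySem.List.pyGetD st.2 docId []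
        (st.1,
         PySem.List.pySetD st.2 docId
           (PySem.List.pySetD row idx (PySem.List.pyGetD row idx 0 + 1)))) st) init

-- ===== PORT B =====
def count_pos_patterns_alt (documents : List (List (String × String))) (window_size : Int) : List String × List (List Int) :=
  let width := window_size
  let st := documents.foldl
    (fun (st : PySem.Dict String (Option Int) × List (PySem.Dict String Int)) document =>
      let inner := (PySem.List.pyRange 0 ((document.length : Int) - width + 1)).foldl
        (fun (st2 : PySem.Dict String (Option Int) × PySem.Dict String Int) i =>
          let key : String := (PySem.List.pyRange 1 width).foldl
            (fun ks j => ks ++ " " ++ (PySem.List.pyGetD document (i + j) ("", "")).2)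
            (PySem.List.pyGetD document i ("", "")).1
          (st2.1.insert key none, st2.2.insert key (st2.2.getD key 0 + 1)))
        (st.1, PySem.Dict.empty)
      (inner.1, st.2 ++ [inner.2]))
    (PySem.Dict.empty, [])
  let pos_patterns := st.1.keys
  (pos_patterns, st.2.map (fun counts => pos_patterns.map (fun p => counts.getD p 0)))

-- ===== PRECONDITION & SPEC =====
-- Pre_ excludes exactly the inputs where the Python raises IndexError: window_size ≤ 0 with a
-- nonempty document list makes A (and B) index document[i] past the end.
def Pre_count_pos_patterns (documents : List (List (String × String))) (window_size : Int) : Prop :=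
  1 ≤ window_size ∨ documents = []
instance (documents : List (List (String × String))) (window_size : Int) : Decidable (Pre_count_pos_patterns documents window_size) := by unfold Pre_count_pos_patterns; infer_instance

def pvWitness_count_pos_patterns : (List (List (String × String))) × Int :=
  ([[("the", "DT"), ("cat", "NN"), ("sat", "VBD")]], 2)

def Spec_count_pos_patterns (documents : List (List (String × String))) (window_size : Int) (out : List String × List (List Int)) : Prop := out = count_pos_patterns_alt documents window_size
instance (documents : List (List (String × String))) (window_size : Int) (out : List String × List (List Int)) : Decidable (Spec_count_pos_patterns documents window_size out) := by unfold Spec_count_pos_patterns; infer_instance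

-- ===== CLAIM (what is proved, stated in full; the proofs are below) =====
def Claim_equal_count_pos_patterns : Prop := ∀ (documents : List (List (String × String))) (window_size : Int), Dom_count_pos_patterns documents window_size → Pre_count_pos_patterns documents window_size → Spec_count_pos_patterns documents window_size (count_pos_patterns documents window_size)

-- ===== LEMMAS AND PROOFS =====

-- The key string built for window start i (identical inline expression in both ports).
def pvKey (document : List (String × String)) (width : Int) (i : Int) : String :=
  (PySem.List.pyRange 1 width).foldl
    (fun ks j => ks ++ " " ++ (PySem.List.pyGetD document (i + j) ("", "")).2)
    (PySem.List.pyGetD document i ("", "")).1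

-- The stream of keys of one document.
def pvKeys (document : List (String × String)) (width : Int) : List String :=
  (PySem.List.pyRange 0 ((document.length : Int) - (width - 1))).map (pvKey document width)

-- A's inner-loop body, abstracted over the key string.
def pvStepA (docId : Int) (st : List String × List (List Int)) (key_str : String) :
    List String × List (List Int) :=
  if key_str ∉ st.1 then
    (st.1 ++ [key_str],
     (PySem.List.enumerate st.2).map
       (fun ir => if ir.1 == docId then ir.2 ++ [(1 : Int)] else ir.2 ++ [(0 : Int)]))
  else
    let idx : Int := ((PySem.List.index? st.1 key_str).getD 0 : Nat)
    let row := PySem.List.pyGetD st.2 docId []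
    (st.1,
     PySem.List.pySetD st.2 docId
       (PySem.List.pySetD row idx (PySem.List.pyGetD row idx 0 + 1)))

-- The whole (document index, key) stream A processes.
def pvPairs (documents : List (List (String × String))) (width : Int) : List (Int × String) :=
  (PySem.List.enumerate documents).flatMap (fun de => (pvKeys de.2 width).map (fun x => (de.1, x)))

-- Occurrences of pattern p among the keys of document k, read off the pair stream.
def pvCnt (M : List (Int × String)) (k : Int) (p : String) : Int :=
  (((M.filter (fun q => q.1 == k)).map (·.2)).count p : Nat)

def pvS (M : List (Int × String)) : List String := PySem.Set.ofList (M.map (·.2))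

def pvV (n : Nat) (M : List (Int × String)) : List (List Int) :=
  (PySem.List.pyRange 0 (n : Int)).map (fun k => (pvS M).map (fun p => pvCnt M k p))

def pvCounter (ks : List String) : PySem.Dict String Int :=
  ks.foldl (fun d x => d.insert x (d.getD x 0 + 1)) PySem.Dict.empty

def pvSeen (s : PySem.Dict String (Option Int)) (ks : List String) : PySem.Dict String (Option Int) :=
  ks.foldl (fun d x => d.insert x none) s

lemma pvCnt_append_single (M : List (Int × String)) (k d : Int) (p x : String) :
    pvCnt (M ++ [(d, x)]) k p = pvCnt M k p + (if k = d ∧ p = x then 1 else 0) := by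
  unfold pvCnt
  rw [List.filter_append]
  by_cases hk : d = k
  · subst hk
    simp [List.count_append, List.count_singleton]
    by_cases hp : p = x <;> simp [hp, eq_comm]
  · simp [hk]
    intro h; omega

lemma pvCnt_eq_zero (M : List (Int × String)) (k : Int) (x : String) (hx : x ∉ M.map (·.2)) :
    pvCnt M k x = 0 := by
  unfold pvCnt
  norm_cast
  rw [List.count_eq_zero]
  intro hmem
  exact hx (by
    rcases List.mem_map.1 hmem with ⟨q, hq, rfl⟩
    exact List.mem_map.2 ⟨q, (List.mem_filter.1 hq).1, rfl⟩)

lemma pvS_append_single (M : List (Int × String)) (d : Int) (x : String) :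
    pvS (M ++ [(d, x)]) = PySem.Set.add (pvS M) x := by
  unfold pvS PySem.Set.ofList
  rw [List.map_append, List.foldl_append]
  rfl

lemma pvSetD_int {α : Type} (xs : List α) (i : Int) (v : α) (h : 0 ≤ i) :
    PySem.List.pySetD xs i v = xs.set i.toNat v := by
  rw [show i = ((i.toNat : Nat) : Int) from by omega, PySem.List.pySetD_natCast]
  simp
  congr 1
  omega

lemma pvStep_eq (n : Nat) (M : List (Int × String)) (d : Int) (x : String)
    (hd0 : 0 ≤ d) (hdn : d < (n : Int)) :
    pvStepA d (pvS M, pvV n M) x = (pvS (M ++ [(d, x)]), pvV n (M ++ [(d, x)])) := by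
  have hxmem : x ∈ pvS M ↔ x ∈ M.map (·.2) := PySem.Set.mem_ofList _ _
  by_cases hx : x ∈ pvS M
  · -- seen before: increment branch
    have hadd : pvS (M ++ [(d, x)]) = pvS M := by
      rw [pvS_append_single]
      simp [PySem.Set.add, hx]
    obtain ⟨k0, hk0⟩ := Option.isSome_iff_exists.1 ((PySem.List.index?_isSome_iff _ _).2 hx)
    obtain ⟨hk0len, hgetk0, -⟩ := PySem.List.getElem_of_index?_eq_some hk0
    have hrow : PySem.List.pyGetD (pvV n M) d [] = (pvS M).map (fun p => pvCnt M d p) := by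
      unfold pvV
      exact PySem.List.pyGetD_map_pyRange_of_nonneg _ _ _ _ hd0 hdn
    have hrowget : PySem.List.pyGetD ((pvS M).map (fun p => pvCnt M d p)) ((k0 : Nat) : Int) 0
        = pvCnt M d x := by
      rw [PySem.List.pyGetD_natCast]
      rw [List.getD_eq_getElem _ _ (by simpa using hk0len)]
      simp [hgetk0]
    have hrowset : ((pvS M).map (fun p => pvCnt M d p)).set k0 (pvCnt M d x + 1)
        = (pvS M).map (fun p => pvCnt (M ++ [(d, x)]) d p) := by
      apply List.ext_getElem
      · simp
      · intro j h1 h2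
        simp only [List.length_set, List.length_map] at h1 h2
        rw [List.getElem_set]
        simp only [List.getElem_map]
        rw [pvCnt_append_single]
        by_cases hj : k0 = j
        · subst hj
          simp [hgetk0]
        · have hne : (pvS M)[j] ≠ x := by
            intro he
            exact hj ((PySem.Set.nodup_ofList _).getElem_inj_iff.1 (hgetk0.trans he.symm))
          simp [hj, hne]
    unfold pvStepA
    rw [if_neg (by simpa using hx)]
    simp only [hk0, Option.getD_some]
    refine Prod.ext (by simpa using hadd.symm) ?_
    simp only []
    rw [hrow, hrowget, PySem.List.pySetD_natCast, hrowset, pvSetD_int _ _ _ hd0]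
    apply List.ext_getElem
    · simp [pvV, PySem.List.length_pyRange_one]
    · intro j h1 h2
      simp only [pvV, List.length_set, List.length_map, PySem.List.length_pyRange_one] at h1 h2
      rw [List.getElem_set]
      simp only [pvV, List.getElem_map, PySem.List.getElem_pyRange_one, zero_add, hadd]
      by_cases hj : d.toNat = j
      · rw [if_pos hj]
        have hjd : ((j : Nat) : Int) = d := by omega
        rw [hjd]
      · rw [if_neg hj]
        apply List.map_congr_left
        intro p _
        rw [pvCnt_append_single]
        have : ¬ (((j : Nat) : Int) = d ∧ p = x) := by
          intro h; exact hj (by omega)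
        simp [this]
  · -- new pattern: append branch
    have hxm : x ∉ M.map (·.2) := fun h => hx (hxmem.2 h)
    have hadd : pvS (M ++ [(d, x)]) = pvS M ++ [x] := by
      rw [pvS_append_single]
      simp [PySem.Set.add, hx]
    unfold pvStepA
    rw [if_pos (by simpa using hx)]
    refine Prod.ext (by simpa using hadd.symm) ?_
    simp only []
    rw [PySem.List.enumerate_eq_map_pyRange _ []]
    rw [List.map_map]
    simp only [pvV, hadd]
    have hlen : PySem.List.len ((PySem.List.pyRange 0 (n:Int)).map
        (fun k => (pvS M).map (fun p => pvCnt M k p))) = (n : Int) := by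
      simp [PySem.List.length_pyRange_one]
    rw [hlen]
    apply List.map_congr_left
    intro j hj
    have hjb := PySem.List.mem_pyRange_one.1 hj
    simp only [Function.comp]
    rw [PySem.List.pyGetD_map_pyRange_of_nonneg _ _ _ _ hjb.1 hjb.2]
    have hmap : (pvS M).map (fun p => pvCnt (M ++ [(d, x)]) j p)
        = (pvS M).map (fun p => pvCnt M j p) := by
      apply List.map_congr_left
      intro p hp
      rw [pvCnt_append_single]
      have : p ≠ x := fun he => hx (he ▸ hp)
      simp [this]
    rw [List.map_append, hmap]
    have hcx : pvCnt (M ++ [(d, x)]) j x = if j = d then 1 else 0 := by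
      rw [pvCnt_append_single, pvCnt_eq_zero _ _ _ hxm]
      simp
    by_cases hjd : j = d
    · subst hjd
      simp [hcx]
    · have hb : (j == d) = false := by simp [hjd]
      simp [hb, hcx, hjd]

lemma pvFold_eq (n : Nat) (L : List (Int × String)) : ∀ (M : List (Int × String)),
    (∀ q ∈ L, 0 ≤ q.1 ∧ q.1 < (n : Int)) →
    L.foldl (fun st p => pvStepA p.1 st p.2) (pvS M, pvV n M) = (pvS (M ++ L), pvV n (M ++ L)) := by
  induction L with
  | nil => intro M _; simp
  | cons q L ih =>
    intro M hL
    rcases q with ⟨d, x⟩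
    rw [List.foldl_cons]
    have hb := hL (d, x) (by simp)
    rw [pvStep_eq n M d x hb.1 hb.2]
    rw [ih (M ++ [(d, x)]) (fun q hq => hL q (by simp [hq]))]
    simp

lemma pvPairs_bounds (documents : List (List (String × String))) (w : Int) (q : Int × String)
    (hq : q ∈ pvPairs documents w) : 0 ≤ q.1 ∧ q.1 < (documents.length : Int) := by
  rcases List.mem_flatMap.1 hq with ⟨de, hde, hq2⟩
  rcases List.mem_map.1 hq2 with ⟨x, _, rfl⟩
  have h1 : de.1 ∈ (PySem.List.enumerate documents 0).map (·.1) := List.mem_map.2 ⟨de, hde, rfl⟩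
  rw [PySem.List.map_fst_enumerate] at h1
  have h2 := PySem.List.mem_pyRange_one.1 h1
  exact ⟨h2.1, by have := h2.2; omega⟩

lemma pvA_char (documents : List (List (String × String))) (w : Int) :
    count_pos_patterns documents w
      = (pvS (pvPairs documents w), pvV documents.length (pvPairs documents w)) := by
  have hred : count_pos_patterns documents w
      = (pvPairs documents w).foldl (fun st p => pvStepA p.1 st p.2)
          ([], (List.range documents.length).map (fun _ => [])) := by
    unfold count_pos_patterns pvPairs
    rw [List.foldl_flatMap]
    simp only [List.foldl_map, pvKeys, pvStepA, pvKey]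
  have hinit : (([], (List.range documents.length).map (fun _ => ([] : List Int)))
      : List String × List (List Int)) = (pvS [], pvV documents.length []) := by
    have hS : pvS ([] : List (Int × String)) = [] := rfl
    refine Prod.ext hS.symm ?_
    simp only [pvV, hS, List.map_nil]
    rw [List.map_const', List.map_const']
    congr 1
    simp [PySem.List.length_pyRange_one]
  rw [hred, hinit, pvFold_eq documents.length _ [] (fun q hq => pvPairs_bounds documents w q hq)]
  simp

lemma pvB_fold (w : Int) (docs : List (List (String × String))) :
    ∀ (s0 : PySem.Dict String (Option Int)) (acc0 : List (PySem.Dict String Int)),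
    docs.foldl
      (fun (st : PySem.Dict String (Option Int) × List (PySem.Dict String Int)) document =>
        let inner := (PySem.List.pyRange 0 ((document.length : Int) - w + 1)).foldl
          (fun (st2 : PySem.Dict String (Option Int) × PySem.Dict String Int) i =>
            let key : String := (PySem.List.pyRange 1 w).foldl
              (fun ks j => ks ++ " " ++ (PySem.List.pyGetD document (i + j) ("", "")).2)
              (PySem.List.pyGetD document i ("", "")).1
            (st2.1.insert key none, st2.2.insert key (st2.2.getD key 0 + 1)))
          (st.1, PySem.Dict.empty)
        (inner.1, st.2 ++ [inner.2]))
      (s0, acc0)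
    = (pvSeen s0 (docs.flatMap (fun doc => pvKeys doc w)),
       acc0 ++ docs.map (fun doc => pvCounter (pvKeys doc w))) := by
  induction docs with
  | nil => intro s0 acc0; simp [pvSeen]
  | cons doc t ih =>
    intro s0 acc0
    rw [List.foldl_cons]
    have hb : ((doc.length : Int) - w + 1) = (doc.length : Int) - (w - 1) := by ring
    have hinner : (PySem.List.pyRange 0 ((doc.length : Int) - w + 1)).foldl
          (fun (st2 : PySem.Dict String (Option Int) × PySem.Dict String Int) i =>
            let key : String := (PySem.List.pyRange 1 w).foldl
              (fun ks j => ks ++ " " ++ (PySem.List.pyGetD doc (i + j) ("", "")).2)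
              (PySem.List.pyGetD doc i ("", "")).1
            (st2.1.insert key none, st2.2.insert key (st2.2.getD key 0 + 1)))
          (s0, PySem.Dict.empty)
        = (pvSeen s0 (pvKeys doc w), pvCounter (pvKeys doc w)) := by
      rw [hb]
      have : (PySem.List.pyRange 0 ((doc.length : Int) - (w - 1))).foldl
          (fun (st2 : PySem.Dict String (Option Int) × PySem.Dict String Int) i =>
            let key : String := (PySem.List.pyRange 1 w).foldl
              (fun ks j => ks ++ " " ++ (PySem.List.pyGetD doc (i + j) ("", "")).2)
              (PySem.List.pyGetD doc i ("", "")).1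
            (st2.1.insert key none, st2.2.insert key (st2.2.getD key 0 + 1)))
          (s0, PySem.Dict.empty)
          = (pvKeys doc w).foldl
            (fun (st2 : PySem.Dict String (Option Int) × PySem.Dict String Int) key =>
              (st2.1.insert key none, st2.2.insert key (st2.2.getD key 0 + 1)))
            (s0, PySem.Dict.empty) := by
        rw [pvKeys, List.foldl_map]
        rfl
      rw [this]
      rw [PySem.List.foldl_prod_mk (f := fun (d : PySem.Dict String (Option Int)) key => d.insert key none)
        (g := fun (d : PySem.Dict String Int) key => d.insert key (d.getD key 0 + 1))]
      rfl
    simp only [hinner]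
    rw [ih]
    refine Prod.ext ?_ (by simp)
    simp only [List.flatMap_cons, pvSeen, List.foldl_append]

lemma pvFilter_pairs (w : Int) (docs : List (List (String × String))) :
    ∀ (s k : Int),
    (((PySem.List.enumerate docs s).flatMap
        (fun de => (pvKeys de.2 w).map (fun x => (de.1, x)))).filter
        (fun q => q.1 == k)).map (·.2)
    = if s ≤ k ∧ k < s + docs.length then pvKeys (PySem.List.pyGetD docs (k - s) []) w else [] := by
  induction docs with
  | nil =>
    intro s k
    rw [if_neg (by intro h; have := h.1; have := h.2; simp at *; omega)]
    simp [PySem.List.enumerate]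
  | cons doc t ih =>
    intro s k
    rw [PySem.List.enumerate_cons, List.flatMap_cons, List.filter_append, List.map_append]
    rw [List.filter_map, ih (s + 1) k]
    by_cases hsk : s = k
    · subst hsk
      have h1 : ((fun (q : Int × String) => q.1 == s) ∘ fun x => (s, x)) = fun _ => true := by
        funext x; simp
      rw [h1, List.filter_true, List.map_map]
      rw [if_neg (by omega)]
      rw [if_pos ⟨le_refl s, by push_cast [List.length_cons]; omega⟩]
      rw [sub_self, PySem.List.pyGetD_zero_cons]
      simp
    · have h1 : ((fun (q : Int × String) => q.1 == k) ∘ fun x => (s, x)) = fun _ => false := by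
        funext x; simp [hsk]
      rw [h1]
      simp only [List.filter_false, List.map_nil, List.nil_append]
      by_cases hc : s + 1 ≤ k ∧ k < s + 1 + t.length
      · rw [if_pos hc, if_pos (by push_cast [List.length_cons] at hc ⊢; omega)]
        congr 1
        have hm : k - s = (((k - s).toNat : Nat) : Int) := by omega
        have hm1 : k - (s + 1) = ((((k - s).toNat - 1 : Nat)) : Int) := by omega
        have h4 : (doc :: t).getD (k - s).toNat [] = t.getD ((k - s).toNat - 1) [] := by
          rw [show (k - s).toNat = ((k - s).toNat - 1) + 1 from by omega, List.getD_cons_succ]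
          congr 1
        rw [hm1, hm, PySem.List.pyGetD_natCast, PySem.List.pyGetD_natCast, h4]
        simp only [Int.toNat_natCast]
      · rw [if_neg hc, if_neg (by push_cast [List.length_cons] at hc ⊢; omega)]

lemma pvB_char (documents : List (List (String × String))) (w : Int) :
    count_pos_patterns_alt documents w
      = (pvS (pvPairs documents w), pvV documents.length (pvPairs documents w)) := by
  have hflat : (pvPairs documents w).map (·.2) = documents.flatMap (fun doc => pvKeys doc w) := by
    unfold pvPairs
    rw [List.map_flatMap]
    rw [show (fun (de : Int × List (String × String)) =>
        ((pvKeys de.2 w).map (fun x => (de.1, x))).map (fun q : Int × String => q.2))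
        = (fun de => pvKeys de.2 w) from funext fun de => by rw [List.map_map]; simp]
    conv_rhs => rw [← PySem.List.map_snd_enumerate documents 0]
    rw [List.flatMap_map]
  have hK : (pvSeen PySem.Dict.empty (documents.flatMap (fun doc => pvKeys doc w))).keys
      = pvS (pvPairs documents w) := by
    unfold pvSeen
    have := PySem.Dict.keys_foldl_insert (documents.flatMap (fun doc => pvKeys doc w))
      (fun _ _ => (none : Option Int)) PySem.Dict.empty
    simp only [] at this
    rw [this, PySem.Dict.keys_empty,
      show ([] : List String) = PySem.Set.empty from rfl, PySem.Set.update_empty, ← hflat]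
    rfl
  have hcount : ∀ ks (p : String), (pvCounter ks).getD p 0 = (ks.count p : Nat) := by
    intro ks p
    unfold pvCounter
    rw [PySem.Dict.getD_foldl_insert_add_one, PySem.Dict.getD_empty]
    ring
  unfold count_pos_patterns_alt
  simp only []
  rw [pvB_fold w documents PySem.Dict.empty []]
  refine Prod.ext (by simpa using hK) ?_
  simp only [hK, List.nil_append]
  rw [List.map_map]
  unfold pvV
  set P := pvPairs documents w with hP
  conv_lhs => rw [← PySem.List.map_pyGetD_pyRange_zero' documents []]
  rw [List.map_map]
  apply List.map_congr_left
  intro k hk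
  have hkb := PySem.List.mem_pyRange_one.1 hk
  simp only [Function.comp]
  apply List.map_congr_left
  intro p hp
  rw [hcount, hP]
  unfold pvCnt pvPairs
  rw [pvFilter_pairs w documents 0 k]
  rw [if_pos ⟨hkb.1, by have := hkb.2; omega⟩]
  rw [sub_zero]

-- ===== VERDICT (by name: the statement is the Claim_ definition above) =====
theorem count_pos_patterns_spec : Claim_equal_count_pos_patterns := by
  intro documents window_size _ _
  unfold Spec_count_pos_patterns
  rw [pvA_char, pvB_char]
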